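-- pv_equiv track=rewrite | github.com/Sivasai517/Ai-Based-Nutrition-Analyzer | app.py | normalize_food_name
-- ===== SOURCE A (Python) =====
-- from typing import Dict, List, Tuple, Optional
--
-- def normalize_food_name(food_name: str, food_names: List[str]) -> Optional[str]:
--     """Find the closest matching food name from the database."""
--     food_name = food_name.lower()
--     # First try exact match
--     for db_food in food_names:
--         if food_name == db_food.lower():
--             return db_food
--     # Then try contains match
--     for db_food in food_names:
--         if food_name in db_food.lower() or db_food.lower() in food_name:
--             return db_food
--     return None
-- ===== SOURCE B (Python) =====
-- from typing import List, Optional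
--
-- def normalize_food_name(food_name: str, food_names: List[str]) -> Optional[str]:
--     """Single pass: return immediately on an exact (case-insensitive) match;
--     otherwise remember the first substring match as a fallback and keep scanning."""
--     food_name = food_name.lower()
--     fallback = None
--     for db_food in food_names:
--         db_lower = db_food.lower()
--         if food_name == db_lower:
--             return db_food
--         if fallback is None and (food_name in db_lower or db_lower in food_name):
--             fallback = db_food
--     return fallback
-- ===== Notes on version B (the rewrite author's own statement) =====
-- stated objective: simpler
-- what changed: Replaces A's two full scans (exact-match loop, then contains-match loop) with one pass that returns on an exact match and carries the first substring match as a fallback accumulator.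
import Mathlib
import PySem

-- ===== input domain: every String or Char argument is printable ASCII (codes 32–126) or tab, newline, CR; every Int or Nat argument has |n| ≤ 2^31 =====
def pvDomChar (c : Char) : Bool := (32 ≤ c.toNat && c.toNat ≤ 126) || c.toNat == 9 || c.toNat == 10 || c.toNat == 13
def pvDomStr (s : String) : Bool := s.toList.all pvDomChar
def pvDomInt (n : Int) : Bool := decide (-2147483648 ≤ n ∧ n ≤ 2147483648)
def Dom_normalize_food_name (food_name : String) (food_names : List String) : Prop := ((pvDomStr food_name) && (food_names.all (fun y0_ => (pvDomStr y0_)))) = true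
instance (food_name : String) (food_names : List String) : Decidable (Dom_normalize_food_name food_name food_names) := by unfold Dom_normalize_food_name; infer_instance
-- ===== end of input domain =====

-- Header: B does one pass with a fallback accumulator instead of A's two scans (simpler); return values only, no mutation.
-- ===== PORT A =====
-- first loop of A: exact case-insensitive match
def pvExactLoop (fn : String) : List String → Option String
  | [] => none
  | d :: rest => if fn == PySem.Str.lower d then some d else pvExactLoop fn rest

-- second loop of A: substring match either way
def pvContainsLoop (fn : String) : List String → Option String
  | [] => none
  | d :: rest =>
    if PySem.Str.isIn fn (PySem.Str.lower d) || PySem.Str.isIn (PySem.Str.lower d) fn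
    then some d else pvContainsLoop fn rest

def normalize_food_name (food_name : String) (food_names : List String) : Option String :=
  let fn := PySem.Str.lower food_name
  match pvExactLoop fn food_names with
  | some r => some r
  | none => pvContainsLoop fn food_names

-- ===== PORT B =====
-- B's single loop, carrying the fallback accumulator
def pvAltGo (fn : String) : List String → Option String → Option String
  | [], fb => fb
  | d :: rest, fb =>
    let dl := PySem.Str.lower d
    if fn == dl then some d
    else if fb.isNone && (PySem.Str.isIn fn dl || PySem.Str.isIn dl fn)
    then pvAltGo fn rest (some d)
    else pvAltGo fn rest fb

def normalize_food_name_alt (food_name : String) (food_names : List String) : Option String :=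
  pvAltGo (PySem.Str.lower food_name) food_names none

-- ===== PRECONDITION & SPEC =====
def Spec_normalize_food_name (food_name : String) (food_names : List String) (out : Option String) : Prop := out = normalize_food_name_alt food_name food_names
instance (food_name : String) (food_names : List String) (out : Option String) : Decidable (Spec_normalize_food_name food_name food_names out) := by unfold Spec_normalize_food_name; infer_instance

-- ===== CLAIM (what is proved, stated in full; the proofs are below) =====
def Claim_equal_normalize_food_name : Prop := ∀ (food_name : String) (food_names : List String), Dom_normalize_food_name food_name food_names → Spec_normalize_food_name food_name food_names (normalize_food_name food_name food_names)

-- ===== LEMMAS AND PROOFS =====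
-- Loop invariant: B's single pass equals A's exact loop, with the fallback (or A's contains loop) as default.
theorem pvAltGo_eq (fn : String) (l : List String) (fb : Option String) :
    pvAltGo fn l fb =
      match pvExactLoop fn l with
      | some r => some r
      | none => match fb with
                | some f => some f
                | none => pvContainsLoop fn l := by
  induction l generalizing fb with
  | nil => cases fb <;> simp [pvAltGo, pvExactLoop, pvContainsLoop]
  | cons d rest ih =>
    by_cases hx : fn == PySem.Str.lower d
    · simp [pvAltGo, pvExactLoop, hx]
    · by_cases hc : PySem.Str.isIn fn (PySem.Str.lower d) || PySem.Str.isIn (PySem.Str.lower d) fn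
      · cases fb with
        | none => simp only [pvAltGo, pvExactLoop, pvContainsLoop, hx, hc]; simp [ih]
        | some f => simp only [pvAltGo, pvExactLoop, hx, hc]; simp [ih]
      · cases fb with
        | none => simp only [pvAltGo, pvExactLoop, pvContainsLoop, hx, hc]; simp [ih]
        | some f => simp only [pvAltGo, pvExactLoop, hx, hc]; simp [ih]

-- ===== VERDICT (by name: the statement is the Claim_ definition above) =====
theorem normalize_food_name_spec : Claim_equal_normalize_food_name := by
  intro food_name food_names _
  unfold Spec_normalize_food_name normalize_food_name normalize_food_name_alt
  rw [pvAltGo_eq]
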